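-- pv_equiv track=rewrite | github.com/sidharthps/Test_Results | answer_1.py | find_process
-- ===== SOURCE A (Python) =====
-- def find_process(start,stop,n):
--     process = []
--     for s,e in zip(start,stop):
--         if not process:
--             process.append(e)
--             continue
--         free_process = [i for i in process if i<=s]
--         if free_process:
--             process[process.index(free_process[0])] = e
--         else:
--             process.append(e)
--     return len(process)
-- ===== SOURCE B (Python) =====
-- def find_process(start, stop, n):
--     # Square-root-style block decomposition: blocks of end-times with cached per-block
--     # minima, so finding the leftmost reusable slot skips whole blocks instead of
--     # scanning the entire slot list each step as A does.
--     K = 64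
--     blocks = []   # list of non-empty lists of end times; concatenation = A's `process`
--     mins = []     # mins[i] == min(blocks[i])
--     for s, e in zip(start, stop):
--         placed = False
--         for bi in range(len(mins)):
--             if mins[bi] <= s:
--                 b = blocks[bi]
--                 for j in range(len(b)):
--                     if b[j] <= s:
--                         b[j] = e
--                         break
--                 mins[bi] = min(b)
--                 placed = True
--                 break
--         if not placed:
--             if blocks and len(blocks[-1]) < K:
--                 blocks[-1].append(e)
--                 mins[-1] = min(mins[-1], e)
--             else:
--                 blocks.append([e])
--                 mins.append(e)
--     return sum(len(b) for b in blocks)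
-- ===== Notes on version B (the rewrite author's own statement) =====
-- stated objective: faster
-- what changed: Instead of rebuilding a full filtered copy of the slot list and re-scanning it with .index at every step, B keeps the end-times in fixed-size blocks with a cached per-block minimum, so finding the leftmost reusable slot skips whole blocks and only scans one block.
import Mathlib
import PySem

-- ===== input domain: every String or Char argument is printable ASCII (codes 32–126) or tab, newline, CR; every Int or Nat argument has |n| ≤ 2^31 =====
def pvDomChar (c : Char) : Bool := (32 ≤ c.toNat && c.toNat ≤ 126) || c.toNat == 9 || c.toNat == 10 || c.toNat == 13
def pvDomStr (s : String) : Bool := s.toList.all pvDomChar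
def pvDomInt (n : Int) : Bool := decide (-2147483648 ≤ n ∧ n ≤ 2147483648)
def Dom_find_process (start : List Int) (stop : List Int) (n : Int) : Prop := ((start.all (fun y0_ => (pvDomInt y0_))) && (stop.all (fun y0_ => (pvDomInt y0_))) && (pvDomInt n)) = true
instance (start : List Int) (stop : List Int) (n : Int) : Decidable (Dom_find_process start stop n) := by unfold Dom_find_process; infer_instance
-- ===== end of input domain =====

-- B replaces A's per-step full filter+index scan of the slot list by a block
-- decomposition with cached per-block minima (objective: faster, measured).


-- ===== PORT A =====
def find_process (start : List Int) (stop : List Int) (n : Int) : Int :=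
  let process := (start.zip stop).foldl (fun process se =>
    if process = [] then
      process ++ [se.2]
    else
      match process.filter (fun i => decide (i ≤ se.1)) with
      | [] => process ++ [se.2]
      | f :: _ =>
        match PySem.List.index? process f with
        | some idx => process.set idx se.2
        | none => process  -- unreachable: f is an element of process
    ) []
  (process.length : Int)

-- ===== PORT B =====
-- inner j-loop: overwrite the first element ≤ s with e (break)
def fpReplace (s e : Int) : List Int → List Int
  | [] => []
  | x :: xs => if x ≤ s then e :: xs else x :: fpReplace s e xs

-- the bi-loop with break: first block whose cached min ≤ s receives the replacement
def fpPlace (s e : Int) : List (List Int) → List Int → Option (List (List Int) × List Int)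
  | b :: bs, m :: ms =>
    if m ≤ s then
      let b' := fpReplace s e b
      some (b' :: bs, ((PySem.List.min? b' (fun x => x)).getD 0) :: ms)  -- b' is non-empty, the getD default is never used
    else
      match fpPlace s e bs ms with
      | some r => some (b :: r.1, m :: r.2)
      | none => none
  | _, _ => none

def fpStep (st : List (List Int) × List Int) (se : Int × Int) : List (List Int) × List Int :=
  match fpPlace se.1 se.2 st.1 st.2 with
  | some st' => st'
  | none =>
    match st.1.getLast?, st.2.getLast? with
    | some lb, some lm =>
      if lb.length < 64 then
        (st.1.dropLast ++ [lb ++ [se.2]], st.2.dropLast ++ [min lm se.2])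
      else
        (st.1 ++ [[se.2]], st.2 ++ [se.2])
    | _, _ => (st.1 ++ [[se.2]], st.2 ++ [se.2])

def find_process_alt (start : List Int) (stop : List Int) (n : Int) : Int :=
  let st := (start.zip stop).foldl fpStep ([], [])
  (((st.1.map List.length).sum : Nat) : Int)

-- ===== PRECONDITION & SPEC =====
def Spec_find_process (start : List Int) (stop : List Int) (n : Int) (out : Int) : Prop := out = find_process_alt start stop n
instance (start : List Int) (stop : List Int) (n : Int) (out : Int) : Decidable (Spec_find_process start stop n out) := by unfold Spec_find_process; infer_instance

-- ===== CLAIM (what is proved, stated in full; the proofs are below) =====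
def Claim_equal_find_process : Prop := ∀ (start : List Int) (stop : List Int) (n : Int), Dom_find_process start stop n → Spec_find_process start stop n (find_process start stop n)

-- ===== LEMMAS AND PROOFS =====

-- "replace the first element ≤ s by e, or fail": the common specification of one step
def repFirst (s e : Int) : List Int → Option (List Int)
  | [] => none
  | x :: xs => if x ≤ s then some (e :: xs) else (repFirst s e xs).map (x :: ·)

def stepA (process : List Int) (se : Int × Int) : List Int :=
  match repFirst se.1 se.2 process with
  | some l => l
  | none => process ++ [se.2]

-- B's invariant: blocks are non-empty and each cached value is its block's minimum
def fpInv : List (List Int) → List Int → Prop :=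
  List.Forall₂ (fun b m => b ≠ [] ∧ PySem.List.min? b (fun x => x) = some m)

theorem repFirst_eq_none_iff (s e : Int) (l : List Int) :
    repFirst s e l = none ↔ ∀ x ∈ l, ¬ x ≤ s := by
  induction l with
  | nil => simp [repFirst]
  | cons x xs ih =>
    by_cases hx : x ≤ s
    · simp [repFirst, hx]
    · simp only [repFirst, if_neg hx, Option.map_eq_none_iff, ih, List.mem_cons]
      constructor
      · intro h y hy
        rcases hy with rfl | hy
        · exact hx
        · exact h y hy
      · intro h y hy; exact h y (Or.inr hy)

theorem key_index (s e : Int) : ∀ (process : List Int) (f : Int) (t : List Int),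
    process.filter (fun i => decide (i ≤ s)) = f :: t →
    ∃ k, PySem.List.index? process f = some k ∧
      repFirst s e process = some (process.set k e) := by
  intro process
  induction process with
  | nil => intro f t h; simp at h
  | cons x xs ih =>
    intro f t h
    by_cases hx : x ≤ s
    · rw [List.filter_cons_of_pos (by simpa using hx)] at h
      have hfx : f = x := (List.cons.inj h).1.symm
      subst hfx
      exact ⟨0, PySem.List.index?_cons_self f xs, by simp [repFirst, hx]⟩
    · rw [List.filter_cons_of_neg (by simpa using hx)] at h
      obtain ⟨k, hk1, hk2⟩ := ih f t h
      have hf_le : f ≤ s := by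
        have hf_mem : f ∈ xs.filter (fun i => decide (i ≤ s)) := by rw [h]; simp
        simpa using List.of_mem_filter hf_mem
      have hfx : x ≠ f := fun hxf => hx (hxf ▸ hf_le)
      refine ⟨k + 1, ?_, ?_⟩
      · rw [PySem.List.index?_cons_of_ne xs hfx, hk1]; rfl
      · simp [repFirst, hx, hk2]

theorem stepA_eq_body (process : List Int) (se : Int × Int) :
    (if process = [] then process ++ [se.2]
     else
      match process.filter (fun i => decide (i ≤ se.1)) with
      | [] => process ++ [se.2]
      | f :: _ =>
        match PySem.List.index? process f with
        | some idx => process.set idx se.2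
        | none => process) = stepA process se := by
  by_cases hp : process = []
  · simp [hp, stepA, repFirst]
  · rw [if_neg hp]
    cases hf : process.filter (fun i => decide (i ≤ se.1)) with
    | nil =>
      have : repFirst se.1 se.2 process = none := by
        rw [repFirst_eq_none_iff]
        intro x hx hxs
        have : x ∈ process.filter (fun i => decide (i ≤ se.1)) :=
          List.mem_filter_of_mem hx (by simpa using hxs)
        simp [hf] at this
      simp [stepA, this]
    | cons f t =>
      obtain ⟨k, hk1, hk2⟩ := key_index se.1 se.2 process f t hf
      have hk1' : List.idxOf? f process = some k := by
        rw [← PySem.List.index?_eq_idxOf?]; exact hk1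
      simp [stepA, hk2, hk1']

theorem min?_le_exists {b : List Int} {m s : Int}
    (hm : PySem.List.min? b (fun x => x) = some m) :
    (m ≤ s ↔ ∃ x ∈ b, x ≤ s) := by
  constructor
  · intro h; exact ⟨m, PySem.List.min?_mem hm, h⟩
  · rintro ⟨x, hx, hxs⟩
    exact le_trans (PySem.List.min?_isMin hm x hx) hxs

theorem fpReplace_ne_nil (s e : Int) (b : List Int) (hb : b ≠ []) :
    fpReplace s e b ≠ [] := by
  cases b with
  | nil => exact absurd rfl hb
  | cons y ys => by_cases hy : y ≤ s <;> simp [fpReplace, hy]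

theorem repFirst_append_left (s e : Int) : ∀ (b r : List Int), (∃ x ∈ b, x ≤ s) →
    repFirst s e (b ++ r) = some (fpReplace s e b ++ r) := by
  intro b
  induction b with
  | nil => rintro r ⟨x, hx, -⟩; simp at hx
  | cons y ys ih =>
    rintro r ⟨x, hx, hxs⟩
    by_cases hy : y ≤ s
    · simp [repFirst, fpReplace, hy]
    · have hxy : x ∈ ys := by
        rcases List.mem_cons.mp hx with rfl | h
        · exact absurd hxs hy
        · exact h
      simp [repFirst, fpReplace, hy, ih r ⟨x, hxy, hxs⟩]

theorem repFirst_append_right (s e : Int) : ∀ (b r : List Int), (∀ x ∈ b, ¬ x ≤ s) →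
    repFirst s e (b ++ r) = (repFirst s e r).map (b ++ ·) := by
  intro b
  induction b with
  | nil => intro r _; simp
  | cons y ys ih =>
    intro r h
    have hy : ¬ y ≤ s := h y (by simp)
    rw [List.cons_append]
    simp only [repFirst, if_neg hy, ih r (fun x hx => h x (List.mem_cons_of_mem y hx))]
    cases repFirst s e r <;> simp

theorem fpPlace_spec (s e : Int) : ∀ (bs : List (List Int)) (ms : List Int), fpInv bs ms →
    (match fpPlace s e bs ms with
     | some r => fpInv r.1 r.2 ∧ repFirst s e bs.flatten = some r.1.flatten
     | none => repFirst s e bs.flatten = none) := by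
  intro bs ms hinv
  induction hinv with
  | nil => simp [fpPlace, repFirst]
  | @cons b m bs ms hbm htail ih =>
    obtain ⟨hbne, hmin⟩ := hbm
    by_cases hms : m ≤ s
    · have hex := (min?_le_exists hmin).mp hms
      have hb'ne := fpReplace_ne_nil s e b hbne
      obtain ⟨m', hm'⟩ : ∃ m', PySem.List.min? (fpReplace s e b) (fun x => x) = some m' := by
        cases h : PySem.List.min? (fpReplace s e b) (fun x => x) with
        | none => exact absurd ((PySem.List.min?_eq_none_iff _ _).mp h) hb'ne
        | some v => exact ⟨v, rfl⟩
      simp only [fpPlace, if_pos hms]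
      constructor
      · exact List.Forall₂.cons ⟨hb'ne, by rw [hm']; simp⟩ htail
      · simpa [List.flatten_cons] using repFirst_append_left s e b bs.flatten hex
    · have hnone : ∀ x ∈ b, ¬ x ≤ s := fun x hx hxs =>
        hms ((min?_le_exists hmin).mpr ⟨x, hx, hxs⟩)
      have hsplit := repFirst_append_right s e b bs.flatten hnone
      simp only [fpPlace, if_neg hms]
      cases hrec : fpPlace s e bs ms with
      | none =>
        rw [hrec] at ih
        simp [List.flatten_cons, hsplit, ih]
      | some r =>
        rw [hrec] at ih
        obtain ⟨hInv, hflat⟩ := ih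
        constructor
        · exact List.Forall₂.cons ⟨hbne, hmin⟩ hInv
        · simp [List.flatten_cons, hsplit, hflat]

theorem min?_append_singleton (l : List Int) (x m : Int)
    (h : PySem.List.min? l (fun y => y) = some m) :
    PySem.List.min? (l ++ [x]) (fun y => y) = some (min m x) := by
  cases l with
  | nil =>
    have h0 : PySem.List.min? ([] : List Int) (fun y => y) = none :=
      (PySem.List.min?_eq_none_iff _ _).mpr rfl
    rw [h0] at h; cases h
  | cons y ys =>
    rw [PySem.List.min?_id_cons] at h
    have hm : m = ys.foldl min y := by injection h with h'; exact h'.symm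
    subst hm
    rw [List.cons_append, PySem.List.min?_id_cons]
    simp [List.foldl_append]

theorem forall₂_concat {α β : Type} {R : α → β → Prop} :
    ∀ {l : List α} {w : List β} (a : α), List.Forall₂ R (l ++ [a]) w →
    ∃ w' b, w = w' ++ [b] ∧ List.Forall₂ R l w' ∧ R a b := by
  intro l
  induction l with
  | nil =>
    intro w a h
    rw [List.nil_append] at h
    cases h with
    | cons hr ht => cases ht; exact ⟨[], _, rfl, List.Forall₂.nil, hr⟩
  | cons x xs ih =>
    intro w a h
    rw [List.cons_append] at h
    cases h with
    | cons hr ht =>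
      obtain ⟨w', b, rfl, h1, h2⟩ := ih a ht
      exact ⟨_ :: w', b, rfl, List.Forall₂.cons hr h1, h2⟩

theorem forall₂_append' {α β : Type} {R : α → β → Prop} :
    ∀ {l₁ : List α} {l₂ : List β} {u₁ : List α} {u₂ : List β},
    List.Forall₂ R l₁ l₂ → List.Forall₂ R u₁ u₂ → List.Forall₂ R (l₁ ++ u₁) (l₂ ++ u₂) := by
  intro l₁
  induction l₁ with
  | nil => intro l₂ u₁ u₂ h hu; cases h; simpa using hu
  | cons x xs ih =>
    intro l₂ u₁ u₂ h hu
    cases h with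
    | cons hr ht => exact List.Forall₂.cons hr (ih ht hu)

theorem fpStep_spec (st : List (List Int) × List Int) (se : Int × Int) (hinv : fpInv st.1 st.2) :
    fpInv (fpStep st se).1 (fpStep st se).2 ∧ (fpStep st se).1.flatten = stepA st.1.flatten se := by
  obtain ⟨bs, ms⟩ := st
  have hplace := fpPlace_spec se.1 se.2 bs ms hinv
  unfold fpStep stepA
  cases hp : fpPlace se.1 se.2 bs ms with
  | some r =>
    rw [hp] at hplace
    obtain ⟨h1, h2⟩ := hplace
    simp only [h2]
    exact ⟨h1, trivial⟩
  | none =>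
    rw [hp] at hplace
    simp only [hplace]
    rcases List.eq_nil_or_concat bs with rfl | ⟨bs', lb, rfl⟩
    · cases hinv
      refine ⟨?_, by simp⟩
      refine List.Forall₂.cons ⟨by simp, ?_⟩ List.Forall₂.nil
      rw [show ([se.2] : List Int) = se.2 :: [] from rfl, PySem.List.min?_id_cons]
      simp
    · simp only [List.concat_eq_append] at hinv hp ⊢
      obtain ⟨ms', lm, rfl, htail, hpair⟩ := forall₂_concat lb
        (show List.Forall₂ (fun b m => b ≠ [] ∧ PySem.List.min? b (fun x => x) = some m)
          (bs' ++ [lb]) ms from hinv)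
      obtain ⟨hlbne, hlbmin⟩ := hpair
      rw [List.getLast?_concat, List.getLast?_concat]
      dsimp only
      by_cases hlen : lb.length < 64
      · rw [if_pos hlen]
        refine ⟨?_, ?_⟩
        · rw [List.dropLast_concat, List.dropLast_concat]
          exact forall₂_append' htail
            (List.Forall₂.cons ⟨by simp, min?_append_singleton lb se.2 lm hlbmin⟩ List.Forall₂.nil)
        · rw [List.dropLast_concat]
          simp [List.flatten_append]
      · rw [if_neg hlen]
        refine ⟨?_, ?_⟩
        · refine forall₂_append' hinv
            (List.Forall₂.cons ⟨by simp, ?_⟩ List.Forall₂.nil)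
          rw [show ([se.2] : List Int) = se.2 :: [] from rfl, PySem.List.min?_id_cons]
          simp
        · simp [List.flatten_append]

theorem foldl_spec : ∀ (l : List (Int × Int)) (bs : List (List Int)) (ms : List Int), fpInv bs ms →
    fpInv (l.foldl fpStep (bs, ms)).1 (l.foldl fpStep (bs, ms)).2 ∧
    (l.foldl fpStep (bs, ms)).1.flatten = l.foldl stepA bs.flatten := by
  intro l
  induction l with
  | nil => intro bs ms h; exact ⟨h, rfl⟩
  | cons p ps ih =>
    intro bs ms h
    obtain ⟨h1, h2⟩ := fpStep_spec (bs, ms) p h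
    simp only [List.foldl_cons]
    have := ih (fpStep (bs, ms) p).1 (fpStep (bs, ms) p).2 h1
    rw [h2] at this
    exact this

-- ===== VERDICT (by name: the statement is the Claim_ definition above) =====
theorem find_process_spec : Claim_equal_find_process := by
  intro start stop n _
  unfold Spec_find_process find_process find_process_alt
  simp only [stepA_eq_body]
  obtain ⟨-, hflat⟩ := foldl_spec (start.zip stop) [] [] List.Forall₂.nil
  have heq : (List.foldl (fun process se => stepA process se) [] (start.zip stop))
      = (List.foldl fpStep ([], []) (start.zip stop)).1.flatten := by
    rw [hflat]; rfl
  rw [heq, List.length_flatten]
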